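-- pv_equiv track=rewrite | github.com/mignaway/university-git | fondamenti-di-programmazione/HW8-req/program01.py | generate_combination_vrect
-- ===== SOURCE A (Python) =====
-- def generate_combination_vrect(colori, d):
--    if d == 0:
--       return [[]]
--    final = []
--    for linea in generate_combination_vrect(colori, d-1):
--       for colore in colori:
--          pippo = linea + [colore]
--          if len(pippo[-2:]) == len(set(pippo[-2:])):
--             final.append(pippo)
--    return final
-- ===== SOURCE B (Python) =====
-- def generate_combination_vrect(colori, d):
--     result = [[]]
--     for _ in range(d):
--         result = [seq + [c] for seq in result for c in colori
--                   if not seq or seq[-1] != c]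
--     return result
-- ===== Notes on version B (the rewrite author's own statement) =====
-- stated objective: simpler
-- what changed: Replaces the recursion on d (with per-sequence set-based duplicate check on the last two elements) by an iterative breadth-first build: a single loop running d times that extends every current sequence with each color whose value differs from the sequence's last element, via one comprehension.
import Mathlib
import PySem

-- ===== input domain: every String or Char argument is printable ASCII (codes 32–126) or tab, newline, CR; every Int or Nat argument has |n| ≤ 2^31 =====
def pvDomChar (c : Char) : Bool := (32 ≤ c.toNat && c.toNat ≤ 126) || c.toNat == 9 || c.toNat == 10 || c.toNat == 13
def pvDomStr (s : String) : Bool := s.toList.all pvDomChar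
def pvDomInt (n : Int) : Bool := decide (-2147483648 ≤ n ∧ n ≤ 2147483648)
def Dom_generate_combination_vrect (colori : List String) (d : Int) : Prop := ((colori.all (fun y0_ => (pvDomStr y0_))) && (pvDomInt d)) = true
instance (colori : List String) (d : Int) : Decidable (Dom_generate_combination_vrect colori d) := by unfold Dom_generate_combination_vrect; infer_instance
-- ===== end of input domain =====

-- B replaces A's recursion on d by an iterative breadth-first build (one loop, a
-- flatMap/filter comprehension per level) with a direct last-element guard: simpler.


-- ===== PORT A =====
-- A's recursion, indexed by the (nonnegative) depth; faithful to A's body step for step.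
def genAuxA (colori : List String) : Nat → List (List String)
  | 0 => [[]]
  | n + 1 =>
    (genAuxA colori n).foldl (fun final linea =>
      colori.foldl (fun final colore =>
        let pippo := linea ++ [colore]
        if (PySem.List.slice pippo (some (-2)) none).length ==
           (PySem.Set.ofList (PySem.List.slice pippo (some (-2)) none)).length
        then final ++ [pippo] else final) final) []

-- For d < 0 the Python recursion never terminates (RecursionError): excluded by Pre_.
def generate_combination_vrect (colori : List String) (d : Int) : List (List String) :=
  genAuxA colori d.toNat

-- ===== PORT B =====
def generate_combination_vrect_alt (colori : List String) (d : Int) : List (List String) :=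
  (PySem.List.pyRange 0 d 1).foldl (fun result _ =>
    result.flatMap (fun seq =>
      (colori.filter (fun c => seq.isEmpty || PySem.List.pyGet? seq (-1) != some c)).map
        (fun c => seq ++ [c]))) [[]]

-- ===== PRECONDITION & SPEC =====
-- Pre_ excludes d < 0, on which the Python A recurses without a base case and raises RecursionError.
def Pre_generate_combination_vrect (colori : List String) (d : Int) : Prop := 0 ≤ d
instance (colori : List String) (d : Int) : Decidable (Pre_generate_combination_vrect colori d) := by unfold Pre_generate_combination_vrect; infer_instance
def pvWitness_generate_combination_vrect : List String × Int := (["a", "b"], 2)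

def Spec_generate_combination_vrect (colori : List String) (d : Int) (out : List (List String)) : Prop := out = generate_combination_vrect_alt colori d
instance (colori : List String) (d : Int) (out : List (List String)) : Decidable (Spec_generate_combination_vrect colori d out) := by unfold Spec_generate_combination_vrect; infer_instance

-- ===== CLAIM (what is proved, stated in full; the proofs are below) =====
def Claim_equal_generate_combination_vrect : Prop := ∀ (colori : List String) (d : Int), Dom_generate_combination_vrect colori d → Pre_generate_combination_vrect colori d → Spec_generate_combination_vrect colori d (generate_combination_vrect colori d)

-- ===== LEMMAS AND PROOFS =====

-- A's set-cardinality check on the last two elements equals B's last-element guard.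
lemma guard_eq (linea : List String) (colore : String) :
    ((PySem.List.slice (linea ++ [colore]) (some (-2)) none).length ==
      (PySem.Set.ofList (PySem.List.slice (linea ++ [colore]) (some (-2)) none)).length)
    = (linea.isEmpty || PySem.List.pyGet? linea (-1) != some colore) := by
  rcases linea.eq_nil_or_concat with rfl | ⟨l, x, rfl⟩
  · simp [PySem.List.slice_from_neg_ofNat _ 2 (by omega), PySem.Set.ofList, PySem.Set.add,
      PySem.Set.contains, PySem.Set.empty]
  · rw [List.concat_eq_append]
    have hs : PySem.List.slice ((l ++ [x]) ++ [colore]) (some (-2)) none = [x, colore] := by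
      rw [PySem.List.slice_from_neg_ofNat _ 2 (by omega)]
      simp
    have hg : PySem.List.pyGet? (l ++ [x]) (-1) = some x := by
      simp [PySem.List.pyGet?, PySem.List.pyIdx?]
    rw [hs, hg]
    by_cases h : colore = x
    · simp [PySem.Set.ofList, PySem.Set.add, PySem.Set.contains, PySem.Set.empty, h]
    · simp [PySem.Set.ofList, PySem.Set.add, PySem.Set.contains, PySem.Set.empty, h, Ne.symm h]

-- One level of A's double loop equals B's comprehension over the same previous level.
lemma step_eq (colori : List String) (prev : List (List String)) :
    prev.foldl (fun final linea =>
      colori.foldl (fun final colore =>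
        let pippo := linea ++ [colore]
        if (PySem.List.slice pippo (some (-2)) none).length ==
           (PySem.Set.ofList (PySem.List.slice pippo (some (-2)) none)).length
        then final ++ [pippo] else final) final) []
    = prev.flatMap (fun seq =>
        (colori.filter (fun c => seq.isEmpty || PySem.List.pyGet? seq (-1) != some c)).map
          (fun c => seq ++ [c])) := by
  have hinner : ∀ (linea : List String) (final : List (List String)),
      colori.foldl (fun final colore =>
        let pippo := linea ++ [colore]
        if (PySem.List.slice pippo (some (-2)) none).length ==
           (PySem.Set.ofList (PySem.List.slice pippo (some (-2)) none)).length
        then final ++ [pippo] else final) final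
      = final ++ (colori.filter (fun c => linea.isEmpty || PySem.List.pyGet? linea (-1) != some c)).map
          (fun c => linea ++ [c]) := by
    intro linea final
    have := PySem.List.foldl_append_if
      (l := colori) (acc := final)
      (p := fun colore => (PySem.List.slice (linea ++ [colore]) (some (-2)) none).length ==
        (PySem.Set.ofList (PySem.List.slice (linea ++ [colore]) (some (-2)) none)).length)
      (f := fun colore => linea ++ [colore])
    rw [this]
    congr 1
    rw [List.filter_congr (fun c _ => guard_eq linea c)]
  calc prev.foldl (fun final linea =>
        colori.foldl (fun final colore =>
          let pippo := linea ++ [colore]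
          if (PySem.List.slice pippo (some (-2)) none).length ==
             (PySem.Set.ofList (PySem.List.slice pippo (some (-2)) none)).length
          then final ++ [pippo] else final) final) []
      = prev.foldl (fun final linea =>
          final ++ (colori.filter (fun c => linea.isEmpty || PySem.List.pyGet? linea (-1) != some c)).map
            (fun c => linea ++ [c])) [] := by
        exact PySem.List.foldl_congr_mem _ _ _ _ (fun final linea _ => hinner linea final)
    _ = _ := by
        rw [PySem.List.foldl_append_eq_flatMap]
        simp

-- B's loop, run n times, computes A's recursion at depth n.
lemma levels_eq (colori : List String) (n : Nat) :
    (PySem.List.pyRange 0 (n : Int) 1).foldl (fun result _ =>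
      result.flatMap (fun seq =>
        (colori.filter (fun c => seq.isEmpty || PySem.List.pyGet? seq (-1) != some c)).map
          (fun c => seq ++ [c]))) [[]]
    = genAuxA colori n := by
  induction n with
  | zero => simp [PySem.List.pyRange_one_eq_nil, genAuxA]
  | succ n ih =>
    have h : ((n : Int) + 1) = ((n + 1 : Nat) : Int) := by push_cast; ring
    rw [← h, PySem.List.pyRange_one_succ_right (by positivity), List.foldl_append, ih]
    simp only [List.foldl_cons, List.foldl_nil, genAuxA]
    rw [step_eq]

-- ===== VERDICT (by name: the statement is the Claim_ definition above) =====
theorem generate_combination_vrect_spec : Claim_equal_generate_combination_vrect := by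
  intro colori d _ hpre
  unfold Spec_generate_combination_vrect generate_combination_vrect generate_combination_vrect_alt
  have hd : d = ((d.toNat : Nat) : Int) := (Int.toNat_of_nonneg hpre).symm
  rw [hd, levels_eq, Int.toNat_natCast]
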